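-- pv_equiv track=rewrite | github.com/zzw168/PVZ_cheat | PVZ_tools.py | Deal_Addr
-- ===== SOURCE A (Python) =====
-- def Deal_Addr(num):
--     if num < 0:
--         num = 0x100000000 + num
--     a = "%X" % num
--     if len(a) < 8:  # 补齐8位
--         for i in range(0, 8 - len(a)):
--             a = "0" + a
--     elif len(a) > 8:
--         a = a[len(a) - 7:-1]
--     b = ""
--     for i in range(0, len(a), 2):  # 重新排列内存地址数据
--         b = (a[i:i + 2]) + b
--     return b
-- ===== SOURCE B (Python) =====
-- def Deal_Addr(num):
--     # pack the 32-bit value little-endian and print it as uppercase hex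
--     return (num % 0x100000000).to_bytes(4, 'little').hex().upper()
-- ===== Notes on version B (the rewrite author's own statement) =====
-- stated objective: idiomatic
-- what changed: Replaces the hex-string building (manual zero-pad loop plus a 2-char-slice reversal loop accumulating a string) with a single arithmetic step: reduce mod 2^32, pack into 4 little-endian bytes and hex-format them; no string loops at all.
import Mathlib
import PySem

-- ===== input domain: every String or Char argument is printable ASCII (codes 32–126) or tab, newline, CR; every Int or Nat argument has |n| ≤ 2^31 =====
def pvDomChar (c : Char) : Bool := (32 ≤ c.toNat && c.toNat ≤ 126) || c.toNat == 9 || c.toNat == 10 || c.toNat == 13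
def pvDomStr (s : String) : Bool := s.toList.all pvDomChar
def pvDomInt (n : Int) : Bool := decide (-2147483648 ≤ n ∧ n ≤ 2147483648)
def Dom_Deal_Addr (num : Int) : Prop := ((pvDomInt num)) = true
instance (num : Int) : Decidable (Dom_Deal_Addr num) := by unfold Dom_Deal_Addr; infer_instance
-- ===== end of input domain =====

-- B replaces A's string-building loops by mod-2^32 reduction and little-endian byte packing (idiomatic; same cost).


-- ===== PORT A =====
-- uppercase hex digit (0-9, A-F)
def pvHexDigit (k : Nat) : Char :=
  if k < 10 then Char.ofNat (48 + k) else Char.ofNat (55 + k)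

-- "%X" % n for a nonnegative n, as Python builds it (most significant digit first)
def pvHexChars (n : Nat) : List Char :=
  if h : n < 16 then [pvHexDigit n]
  else pvHexChars (n / 16) ++ [pvHexDigit (n % 16)]
decreasing_by exact Nat.div_lt_self (by omega) (by omega)

def Deal_Addr (num : Int) : String :=
  let num' := if num < 0 then 0x100000000 + num else num
  -- "%X" % num : Python prints a minus sign for a negative value
  let a : List Char :=
    if num' < 0 then '-' :: pvHexChars (-num').toNat else pvHexChars num'.toNat
  let a :=
    if (a.length : Int) < 8 then
      (PySem.List.pyRange 0 (8 - (a.length : Int)) 1).foldl (fun s _ => '0' :: s) a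
    else if (a.length : Int) > 8 then
      PySem.List.slice a (some ((a.length : Int) - 7)) (some (-1))
    else a
  let b := (PySem.List.pyRange 0 (a.length : Int) 2).foldl
      (fun b i => PySem.List.slice a (some i) (some (i + 2)) ++ b) ([] : List Char)
  String.mk b

-- ===== PORT B =====
-- one byte as two hex chars; '.hex().upper()' is ported directly as uppercase hex digits (exact: digits are 0-9A-F)
def pvByteHex (b : Nat) : List Char := [pvHexDigit (b / 16), pvHexDigit (b % 16)]

def Deal_Addr_alt (num : Int) : String :=
  let n := (PySem.Int.mod num 0x100000000).toNat
  -- to_bytes(4,'little'): bytes n%256, n/2^8%256, n/2^16%256, n/2^24%256, each printed as 2 hex chars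
  String.mk (pvByteHex (n % 256) ++ pvByteHex (n / 256 % 256) ++
             pvByteHex (n / 65536 % 256) ++ pvByteHex (n / 16777216 % 256))

-- ===== PRECONDITION & SPEC =====
def Spec_Deal_Addr (num : Int) (out : String) : Prop := out = Deal_Addr_alt num
instance (num : Int) (out : String) : Decidable (Spec_Deal_Addr num out) := by unfold Spec_Deal_Addr; infer_instance

-- ===== CLAIM (what is proved, stated in full; the proofs are below) =====
def Claim_equal_Deal_Addr : Prop := ∀ (num : Int), Dom_Deal_Addr num → Spec_Deal_Addr num (Deal_Addr num)

-- ===== LEMMAS AND PROOFS =====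

-- k-digit fixed-width hex rendering (most significant first)
def pvFixedHex : Nat → Nat → List Char
  | 0, _ => []
  | k + 1, n => pvFixedHex k (n / 16) ++ [pvHexDigit (n % 16)]

theorem pvFixedHex_zero (k : Nat) : pvFixedHex k 0 = List.replicate k '0' := by
  induction k with
  | zero => rfl
  | succ k ih => simp [pvFixedHex, ih, List.replicate_succ', pvHexDigit]

theorem len_fixed (k n : Nat) : (pvFixedHex k n).length = k := by
  induction k generalizing n with
  | zero => rfl
  | succ k ih => simp [pvFixedHex, ih]

theorem pad_fixed (k : Nat) : ∀ n, n < 16 ^ (k + 1) →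
    List.replicate (k + 1 - (pvHexChars n).length) '0' ++ pvHexChars n = pvFixedHex (k + 1) n := by
  induction k with
  | zero =>
    intro n h
    have h16 : n < 16 := by simpa using h
    rw [pvHexChars, dif_pos h16]
    simp [pvFixedHex, Nat.div_eq_of_lt h16, Nat.mod_eq_of_lt h16]
  | succ k ih =>
    intro n h
    by_cases h16 : n < 16
    · rw [pvHexChars, dif_pos h16]
      simp only [List.length_singleton]
      rw [pvFixedHex, Nat.div_eq_of_lt h16, Nat.mod_eq_of_lt h16, pvFixedHex_zero]
      simp [List.replicate_succ']
    · rw [pvHexChars, dif_neg h16]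
      have hpow : 16 ^ (k + 1 + 1) = 16 ^ (k + 1) * 16 := by ring
      have hdiv : n / 16 < 16 ^ (k + 1) := by
        rw [Nat.div_lt_iff_lt_mul (by norm_num)]; omega
      have ihh := ih (n / 16) hdiv
      have hlen : (pvHexChars (n / 16)).length ≤ k + 1 := by
        have hl := congrArg List.length ihh
        simp [len_fixed] at hl; omega
      rw [pvFixedHex, ← ihh, List.length_append, List.length_singleton, ← List.append_assoc]
      have harith : k + 1 + 1 - ((pvHexChars (n / 16)).length + 1) =
          k + 1 - (pvHexChars (n / 16)).length := by omega
      rw [harith]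

theorem fold_pad_aux {α : Type} (l : List α) (a : List Char) :
    l.foldl (fun s _ => '0' :: s) a = List.replicate l.length '0' ++ a := by
  induction l generalizing a with
  | nil => rfl
  | cons x xs ih =>
    rw [List.foldl_cons, ih ('0' :: a), List.length_cons, ← List.singleton_append,
      ← List.append_assoc, ← List.replicate_succ']

theorem fold_pad (j : Nat) (a : List Char) :
    (PySem.List.pyRange 0 (j : Int) 1).foldl (fun s _ => '0' :: s) a =
      List.replicate j '0' ++ a := by
  rw [fold_pad_aux, PySem.List.length_pyRange_one]
  simp

theorem eight_list (n : Nat) :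
    pvFixedHex 8 n = [pvHexDigit (n / 268435456 % 16), pvHexDigit (n / 16777216 % 16),
      pvHexDigit (n / 1048576 % 16), pvHexDigit (n / 65536 % 16), pvHexDigit (n / 4096 % 16),
      pvHexDigit (n / 256 % 16), pvHexDigit (n / 16 % 16), pvHexDigit (n % 16)] := by
  norm_num [pvFixedHex, Nat.div_div_eq_div_mul]

theorem padded (n : Nat) (h : n < 16 ^ 8) :
    (if ((pvHexChars n).length : Int) < 8 then
        (PySem.List.pyRange 0 (8 - ((pvHexChars n).length : Int)) 1).foldl
          (fun s _ => '0' :: s) (pvHexChars n)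
      else if ((pvHexChars n).length : Int) > 8 then
        PySem.List.slice (pvHexChars n) (some (((pvHexChars n).length : Int) - 7)) (some (-1))
      else pvHexChars n) = pvFixedHex 8 n := by
  have hpad := pad_fixed 7 n h
  norm_num at hpad
  have hL : (pvHexChars n).length ≤ 8 := by
    have hl := congrArg List.length hpad
    simp [len_fixed] at hl; omega
  by_cases hlt : ((pvHexChars n).length : Int) < 8
  · rw [if_pos hlt]
    have hcast : (8 : Int) - ((pvHexChars n).length : Int) =
        ((8 - (pvHexChars n).length : Nat) : Int) := by omega
    rw [hcast, fold_pad, hpad]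
  · have h8 : (pvHexChars n).length = 8 := by omega
    rw [if_neg hlt, if_neg (by omega)]
    rw [h8] at hpad
    simpa using hpad

theorem tail_loop (n : Nat) :
    (PySem.List.pyRange 0 ((pvFixedHex 8 n).length : Int) 2).foldl
        (fun b i => PySem.List.slice (pvFixedHex 8 n) (some i) (some (i + 2)) ++ b)
        ([] : List Char) =
      [pvHexDigit (n / 16 % 16), pvHexDigit (n % 16), pvHexDigit (n / 4096 % 16),
       pvHexDigit (n / 256 % 16), pvHexDigit (n / 1048576 % 16), pvHexDigit (n / 65536 % 16),
       pvHexDigit (n / 268435456 % 16), pvHexDigit (n / 16777216 % 16)] := by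
  rw [len_fixed]
  have hr : PySem.List.pyRange 0 ((8 : Nat) : Int) 2 = [0, 2, 4, 6] := by decide
  rw [hr, eight_list]
  rfl

-- ===== VERDICT (by name: the statement is the Claim_ definition above) =====
theorem Deal_Addr_spec : Claim_equal_Deal_Addr := by
  intro num hDom
  have hd : -2147483648 ≤ num ∧ num ≤ 2147483648 := by
    simpa [Dom_Deal_Addr, pvDomInt] using hDom
  unfold Spec_Deal_Addr Deal_Addr Deal_Addr_alt
  simp only []
  set m : Int := if num < 0 then 0x100000000 + num else num with hm
  have hm0 : 0 ≤ m := by rw [hm]; split <;> omega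
  have hmlt : m < 4294967296 := by rw [hm]; split <;> omega
  have hneg : ¬ m < 0 := by omega
  rw [if_neg hneg]
  have hmod : PySem.Int.mod num 0x100000000 = m := by
    rw [PySem.Int.mod_eq_emod_of_pos (by norm_num)]
    rw [hm]; split <;> omega
  rw [hmod]
  have hn8 : m.toNat < 16 ^ 8 := by omega
  rw [padded m.toNat hn8, tail_loop]
  simp only [pvByteHex]
  apply congrArg String.mk
  simp only [List.cons_append, List.nil_append, List.cons.injEq, and_true]
  refine ⟨?_, ?_, ?_, ?_, ?_, ?_, ?_, ?_⟩ <;> exact congrArg pvHexDigit (by omega)
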